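-- pv_equiv track=rewrite | github.com/AndreaGiorgi/AGIW-Assignments | Project 3/evaluation.py | cluster2pairs
-- ===== SOURCE A (Python) =====
-- def cluster2pairs(clusters):
--     output = []
--     for cluster in clusters:
--         combinations = []
--         for i in cluster:
--             for j in cluster:
--                 if(j,i) not in combinations and i != j:
--                     combinations.append((i,j))
--         for couple in combinations:
--             output.append(couple)
--
--     return set(output)
-- ===== SOURCE B (Python) =====
-- def cluster2pairs(clusters):
--     output = set()
--     for cluster in clusters:
--         seen = []
--         for x in cluster:
--             if x not in seen:
--                 seen.append(x)
--         rest = seen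
--         while rest:
--             a = rest[0]
--             rest = rest[1:]
--             for y in rest:
--                 output.add((a, y))
--     return output
-- ===== Notes on version B (the rewrite author's own statement) =====
-- stated objective: simpler
-- what changed: Per cluster, A runs a double loop over all (possibly duplicated) elements guarded by a linear membership scan of the reversed pair in the growing pair list, deduping only via set() at the end; B first dedups the cluster into its distinct values in first-appearance order and then adds the plain ordered combinations of that deduped list to a set, with no membership scan over the pair list.
import Mathlib
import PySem

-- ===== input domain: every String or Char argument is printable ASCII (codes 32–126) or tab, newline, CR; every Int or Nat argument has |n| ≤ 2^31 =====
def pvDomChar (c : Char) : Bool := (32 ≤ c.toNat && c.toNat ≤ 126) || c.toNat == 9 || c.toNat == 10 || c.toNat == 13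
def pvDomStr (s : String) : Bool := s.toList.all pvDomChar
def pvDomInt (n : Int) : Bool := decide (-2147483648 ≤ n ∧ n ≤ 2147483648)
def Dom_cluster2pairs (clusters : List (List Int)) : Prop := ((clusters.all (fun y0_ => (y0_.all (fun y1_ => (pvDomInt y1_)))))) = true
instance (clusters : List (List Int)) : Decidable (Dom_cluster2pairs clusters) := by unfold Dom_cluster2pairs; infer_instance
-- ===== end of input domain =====

-- B replaces A's guarded quadratic double scan per cluster by a dedup pass followed by
-- plain combinations over the deduped values, dropping the per-step pair-list membership scan (objective: simpler; measured faster).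

-- ===== PORT A =====
def cluster2pairs (clusters : List (List Int)) : List (Int × Int) :=
  let output :=
    clusters.foldl (fun output cluster =>
      let combinations :=
        cluster.foldl (fun combs i =>
          cluster.foldl (fun combs j =>
            if (j, i) ∉ combs ∧ i ≠ j then combs ++ [(i, j)] else combs) combs) []
      combinations.foldl (fun out couple => out ++ [couple]) output) []
  PySem.Set.ofList output

-- ===== PORT B =====
-- the 'while rest: a = rest[0]; rest = rest[1:]; for y in rest: output.add((a, y))' loop of Source B
def pvCombAdd (output : PySem.Set (Int × Int)) : List Int → PySem.Set (Int × Int)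
  | [] => output
  | a :: rest => pvCombAdd (rest.foldl (fun o y => PySem.Set.add o (a, y)) output) rest

def cluster2pairs_alt (clusters : List (List Int)) : List (Int × Int) :=
  clusters.foldl (fun output cluster =>
    let seen := cluster.foldl (fun seen x => if x ∉ seen then seen ++ [x] else seen) []
    pvCombAdd output seen) []

-- ===== PRECONDITION & SPEC =====
def Spec_cluster2pairs (clusters : List (List Int)) (out : List (Int × Int)) : Prop := out = cluster2pairs_alt clusters
instance (clusters : List (List Int)) (out : List (Int × Int)) : Decidable (Spec_cluster2pairs clusters out) := by unfold Spec_cluster2pairs; infer_instance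

-- ===== CLAIM (what is proved, stated in full; the proofs are below) =====
def Claim_equal_cluster2pairs : Prop := ∀ (clusters : List (List Int)), Dom_cluster2pairs clusters → Spec_cluster2pairs clusters (cluster2pairs clusters)

-- ===== LEMMAS AND PROOFS =====

-- `cp pre post`: the ordered pairs contributed by the processed distinct values `pre`,
-- where `pre ++ post` is the full list of distinct values of the cluster.
def cp : List Int → List Int → List (Int × Int)
  | [], _ => []
  | a :: pre, post => (pre ++ post).map (fun y => (a, y)) ++ cp pre post

theorem cp_snoc (pre post : List Int) (v : Int) :
    cp (pre ++ [v]) post = cp pre (v :: post) ++ post.map (fun y => (v, y)) := by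
  induction pre with
  | nil => simp [cp]
  | cons a pre ih => simp [cp, ih]

theorem mem_cp {x y : Int} {pre post : List Int} :
    (x, y) ∈ cp pre post ↔ ∃ p1 p2, pre = p1 ++ x :: p2 ∧ y ∈ p2 ++ post := by
  induction pre with
  | nil => simp [cp]
  | cons a pre ih =>
    simp only [cp, List.mem_append, List.mem_map, ih]
    constructor
    · rintro (⟨b, hb, h⟩ | ⟨p1, p2, rfl, hy⟩)
      · obtain ⟨rfl, rfl⟩ : a = x ∧ b = y := by simpa [Prod.ext_iff] using h
        exact ⟨[], pre, rfl, by simpa using hb⟩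
      · exact ⟨a :: p1, p2, rfl, hy⟩
    · rintro ⟨p1, p2, hpre, hy⟩
      cases p1 with
      | nil =>
        simp only [List.nil_append, List.cons.injEq] at hpre
        obtain ⟨rfl, rfl⟩ := hpre
        exact Or.inl ⟨y, by simpa using hy, rfl⟩
      | cons b p1 =>
        simp only [List.cons_append, List.cons.injEq] at hpre
        exact Or.inr ⟨p1, p2, hpre.2, hy⟩

theorem cp_nodup {pre post : List Int} (h : (pre ++ post).Nodup) : (cp pre post).Nodup := by
  induction pre with
  | nil => simp [cp]
  | cons a pre ih =>
    simp only [List.cons_append, List.nodup_cons] at h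
    refine List.Nodup.append ?_ (ih h.2) ?_
    · exact h.2.map (fun y z hyz => ((Prod.mk.injEq _ _ _ _).mp hyz).2)
    · rintro ⟨x, y⟩ hx hy
      rcases List.mem_map.mp hx with ⟨b, hb, hab⟩
      obtain ⟨rfl, rfl⟩ : a = x ∧ b = y := by simpa [Prod.ext_iff] using hab
      rcases mem_cp.mp hy with ⟨p1, p2, hpre, -⟩
      exact h.1 (by rw [hpre]; simp)

-- ofList commutes with an injective-section map y ↦ (v, y)
theorem ofList_map_mk (v : Int) (l : List Int) :
    PySem.Set.ofList (l.map (fun y => (v, y))) = (PySem.Set.ofList l).map (fun y => (v, y)) := by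
  induction l using List.reverseRecOn with
  | nil => simp
  | append_singleton l x ih =>
    rw [List.map_append, List.map_singleton, PySem.Set.ofList_append_singleton,
      PySem.Set.ofList_append_singleton, ih]
    by_cases hx : x ∈ PySem.Set.ofList l
    · rw [PySem.Set.add_of_mem hx, PySem.Set.add_of_mem (List.mem_map.mpr ⟨x, hx, rfl⟩)]
    · rw [PySem.Set.add_of_not_mem hx, PySem.Set.add_of_not_mem ?_, List.map_append,
        List.map_singleton]
      intro hmem
      rcases List.mem_map.mp hmem with ⟨b, hb, hab⟩
      obtain ⟨-, rfl⟩ : v = v ∧ b = x := by simpa [Prod.ext_iff] using hab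
      exact hx hb


-- ofList commutes with filter
theorem ofList_filter (g : Int → Bool) (l : List Int) :
    PySem.Set.ofList (l.filter g) = (PySem.Set.ofList l).filter g := by
  induction l using List.reverseRecOn with
  | nil => simp
  | append_singleton l x ih =>
    by_cases hgx : g x = true
    · have hl : (l ++ [x]).filter g = l.filter g ++ [x] := by simp [List.filter_append, hgx]
      rw [hl, PySem.Set.ofList_append_singleton, PySem.Set.ofList_append_singleton]
      by_cases hx : x ∈ PySem.Set.ofList l
      · have hx' : x ∈ PySem.Set.ofList (l.filter g) := by
          rw [PySem.Set.mem_ofList] at hx ⊢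
          exact List.mem_filter.mpr ⟨hx, hgx⟩
        rw [PySem.Set.add_of_mem hx, PySem.Set.add_of_mem hx', ih]
      · have hx' : x ∉ PySem.Set.ofList (l.filter g) := by
          rw [PySem.Set.mem_ofList] at hx ⊢
          exact fun hm => hx (List.mem_filter.mp hm).1
        rw [PySem.Set.add_of_not_mem hx, PySem.Set.add_of_not_mem hx', ih,
          List.filter_append]
        simp [hgx]
    · have hl : (l ++ [x]).filter g = l.filter g := by simp [List.filter_append, hgx]
      rw [hl, ih, PySem.Set.ofList_append_singleton]
      by_cases hx : x ∈ PySem.Set.ofList l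
      · rw [PySem.Set.add_of_mem hx]
      · rw [PySem.Set.add_of_not_mem hx, List.filter_append]
        simp [hgx]

-- the inner loop `for j in cluster: …` with fixed i = v
theorem inner_loop (v : Int) (w : List Int) (c0 : List (Int × Int)) (extra : List Int) :
    w.foldl (fun combs j => if (j, v) ∉ combs ∧ v ≠ j then combs ++ [(v, j)] else combs)
        (c0 ++ extra.map (fun y => (v, y)))
      = c0 ++ (extra ++ w.filter (fun j => decide ((j, v) ∉ c0 ∧ v ≠ j))).map (fun y => (v, y)) := by
  induction w generalizing extra with
  | nil => simp
  | cons j w ih =>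
    by_cases hcond : (j, v) ∉ c0 ∧ v ≠ j
    · have hnot : (j, v) ∉ c0 ++ extra.map (fun y => (v, y)) := by
        simp only [List.mem_append, List.mem_map]
        rintro (h | ⟨b, -, hb⟩)
        · exact hcond.1 h
        · exact hcond.2 ((Prod.mk.injEq _ _ _ _).mp hb).1
      have hstep : (if (j, v) ∉ c0 ++ extra.map (fun y => (v, y)) ∧ v ≠ j
          then (c0 ++ extra.map (fun y => (v, y))) ++ [(v, j)]
          else c0 ++ extra.map (fun y => (v, y)))
          = c0 ++ (extra ++ [j]).map (fun y => (v, y)) := by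
        rw [if_pos ⟨hnot, hcond.2⟩]; simp
      rw [List.foldl_cons, hstep, ih (extra ++ [j])]
      have hfil : (j :: w).filter (fun j => decide ((j, v) ∉ c0 ∧ v ≠ j))
          = j :: w.filter (fun j => decide ((j, v) ∉ c0 ∧ v ≠ j)) := by
        simp [hcond.1, hcond.2]
      rw [hfil]; simp
    · have hnotif : ¬ ((j, v) ∉ c0 ++ extra.map (fun y => (v, y)) ∧ v ≠ j) := by
        intro h
        exact hcond ⟨fun hc => h.1 (List.mem_append_left _ hc), h.2⟩
      rw [List.foldl_cons, if_neg hnotif, ih extra]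
      have hdec : (decide ((j, v) ∉ c0 ∧ v ≠ j)) = false := by simpa using hcond
      have hfil : (j :: w).filter (fun j => decide ((j, v) ∉ c0 ∧ v ≠ j))
          = w.filter (fun j => decide ((j, v) ∉ c0 ∧ v ≠ j)) := by
        rw [List.filter_cons, hdec]; simp
      rw [hfil]

-- the outer loop, with invariant ofList combs = cp (ofList p) ur
theorem outer_loop (cluster : List Int) :
    ∀ (q p ur : List Int) (combs : List (Int × Int)),
      cluster = p ++ q →
      PySem.Set.ofList cluster = PySem.Set.ofList p ++ ur →
      PySem.Set.ofList combs = cp (PySem.Set.ofList p) ur →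
      PySem.Set.ofList
        (q.foldl (fun combs i =>
          cluster.foldl (fun combs j =>
            if (j, i) ∉ combs ∧ i ≠ j then combs ++ [(i, j)] else combs) combs) combs)
        = cp (PySem.Set.ofList cluster) [] := by
  intro q
  induction q with
  | nil =>
    intro p ur combs hpq hsplit hinv
    rw [List.append_nil] at hpq
    subst hpq
    have hur : ur = [] := List.append_right_eq_self.mp hsplit.symm
    subst hur
    rw [List.foldl_nil]
    exact hinv
  | cons v q ih =>
    intro p ur combs hpq hsplit hinv
    have hmem : ∀ z : Int × Int, z ∈ combs ↔ z ∈ cp (PySem.Set.ofList p) ur := by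
      intro z; rw [← PySem.Set.mem_ofList, hinv]
    have hc' : cluster.foldl (fun combs j =>
          if (j, v) ∉ combs ∧ v ≠ j then combs ++ [(v, j)] else combs) combs
        = combs ++ (cluster.filter (fun j => decide ((j, v) ∉ combs ∧ v ≠ j))).map
            (fun y => (v, y)) := by
      simpa using inner_loop v cluster combs []
    rw [List.foldl_cons, hc']
    by_cases hv : v ∈ PySem.Set.ofList p
    · -- v was already processed: the appended pairs are all duplicates
      have hall : ∀ z ∈ (cluster.filter (fun j => decide ((j, v) ∉ combs ∧ v ≠ j))).map
          (fun y => (v, y)), z ∈ combs := by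
        rintro z hz
        rcases List.mem_map.mp hz with ⟨j, hjf, rfl⟩
        rcases List.mem_filter.mp hjf with ⟨hjc, hjp⟩
        rcases of_decide_eq_true hjp with ⟨hjv, hvj⟩
        rcases List.append_of_mem hv with ⟨α, β, hup⟩
        have hju : j ∈ (α ++ v :: β) ++ ur := by
          rw [← hup, ← hsplit, PySem.Set.mem_ofList]; exact hjc
        have : j ∈ α ∨ j = v ∨ j ∈ β ++ ur := by
          simpa [List.mem_append, or_assoc] using hju
        rcases this with hjα | hjeq | hjr
        · exfalso
          rcases List.append_of_mem hjα with ⟨α1, α2, hα⟩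
          exact hjv ((hmem (j, v)).mpr (mem_cp.mpr
            ⟨α1, α2 ++ v :: β, by rw [hup, hα]; simp, by simp⟩))
        · exact absurd hjeq.symm hvj
        · exact (hmem (v, j)).mpr (mem_cp.mpr ⟨α, β, hup, hjr⟩)
      have hof : PySem.Set.ofList (combs ++ (cluster.filter
            (fun j => decide ((j, v) ∉ combs ∧ v ≠ j))).map (fun y => (v, y)))
          = PySem.Set.ofList combs := by
        rw [PySem.Set.ofList_append, PySem.Set.update_eq_append_filter]
        have : (PySem.Set.ofList ((cluster.filter
              (fun j => decide ((j, v) ∉ combs ∧ v ≠ j))).map (fun y => (v, y)))).filter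
              (fun y => !((PySem.Set.ofList combs).contains y)) = [] := by
          refine List.filter_eq_nil_iff.mpr (fun a ha => ?_)
          rw [PySem.Set.mem_ofList] at ha
          have : a ∈ combs := hall a ha
          simp [PySem.Set.mem_ofList, this]
        rw [this, List.append_nil]
      have hofp : PySem.Set.ofList (p ++ [v]) = PySem.Set.ofList p := by
        rw [PySem.Set.ofList_append_singleton, PySem.Set.add_of_mem hv]
      refine ih (p ++ [v]) ur _ (by rw [hpq]; simp) (by rw [hofp]; exact hsplit) ?_
      rw [hof, hinv, hofp]
    · -- v is a new value: its pairs with the still-unprocessed values are appended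
      have hofp : PySem.Set.ofList (p ++ [v]) = PySem.Set.ofList p ++ [v] := by
        rw [PySem.Set.ofList_append_singleton, PySem.Set.add_of_not_mem hv]
      -- the distinct values of cluster split as up ++ v :: t
      have hu2 : PySem.Set.ofList cluster
          = (PySem.Set.ofList p ++ [v]) ++ ((PySem.Set.ofList q).filter
              (fun y => !((PySem.Set.ofList p ++ [v]).contains y))) := by
        rw [hpq, show p ++ v :: q = (p ++ [v]) ++ q by simp, PySem.Set.ofList_append,
          PySem.Set.update_eq_append_filter, hofp]
      set t := (PySem.Set.ofList q).filter
          (fun y => !((PySem.Set.ofList p ++ [v]).contains y)) with ht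
      have hur : ur = v :: t := by
        have := hsplit.symm.trans hu2
        rw [List.append_assoc] at this
        simpa using List.append_cancel_left this
      subst hur
      have htail : PySem.Set.ofList cluster = PySem.Set.ofList p ++ v :: t := by
        rw [hu2]; simp
      have hnd : (PySem.Set.ofList p ++ v :: t).Nodup := by
        rw [← htail]; exact PySem.Set.nodup_ofList cluster
      rcases List.nodup_append.mp hnd with ⟨-, hndvt, hdisj⟩
      have hvt : v ∉ t := (List.nodup_cons.mp hndvt).1
      -- characterize the filter predicate on members of cluster
      have hfilter : cluster.filter (fun j => decide ((j, v) ∉ combs ∧ v ≠ j))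
          = cluster.filter (fun j => decide (j ∉ PySem.Set.ofList p ∧ v ≠ j)) := by
        refine List.filter_congr (fun j hj => ?_)
        refine decide_eq_decide.mpr (and_congr_left fun hvj => not_congr ?_)
        rw [hmem (j, v), mem_cp]
        constructor
        · rintro ⟨p1, p2, hps, -⟩; rw [hps]; simp
        · intro hjp
          rcases List.append_of_mem hjp with ⟨p1, p2, hps⟩
          exact ⟨p1, p2, hps, by simp⟩
      -- the new distinct values are exactly t
      have hfu : (PySem.Set.ofList cluster).filter
          (fun j => decide (j ∉ PySem.Set.ofList p ∧ v ≠ j)) = t := by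
        rw [htail, List.filter_append, List.filter_cons]
        have h1 : (PySem.Set.ofList p).filter
            (fun j => decide (j ∉ PySem.Set.ofList p ∧ v ≠ j)) = [] :=
          List.filter_eq_nil_iff.mpr (fun a ha => by simp [ha])
        have h2 : (decide (v ∉ PySem.Set.ofList p ∧ v ≠ v)) = false := by simp
        have h3 : t.filter (fun j => decide (j ∉ PySem.Set.ofList p ∧ v ≠ j)) = t :=
          List.filter_eq_self.mpr (fun a ha => by
            have hna : a ∉ PySem.Set.ofList p :=
              fun hc => (hdisj a hc a (List.mem_cons_of_mem v ha)) rfl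
            have hne : v ≠ a := fun hc => hvt (hc ▸ ha)
            simp [hna, hne])
        rw [h1, h2, h3]; simp
      have hofnew : PySem.Set.ofList ((cluster.filter
            (fun j => decide ((j, v) ∉ combs ∧ v ≠ j))).map (fun y => (v, y)))
          = t.map (fun y => (v, y)) := by
        rw [hfilter, ofList_map_mk, ofList_filter, hfu]
      have hof : PySem.Set.ofList (combs ++ (cluster.filter
            (fun j => decide ((j, v) ∉ combs ∧ v ≠ j))).map (fun y => (v, y)))
          = cp (PySem.Set.ofList p ++ [v]) t := by
        rw [PySem.Set.ofList_append, PySem.Set.update_eq_append_filter, hofnew, hinv,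
          cp_snoc]
        congr 1
        refine List.filter_eq_self.mpr (fun a ha => ?_)
        rcases List.mem_map.mp ha with ⟨y, -, rfl⟩
        have : (v, y) ∉ cp (PySem.Set.ofList p) (v :: t) := by
          intro hc
          rcases mem_cp.mp hc with ⟨p1, p2, hps, -⟩
          exact hv (by rw [hps]; simp)
        simp [this]
      refine ih (p ++ [v]) t _ (by rw [hpq]; simp) (by rw [hofp]; exact hu2) ?_
      rw [hof, hofp]

-- pvCombAdd is folding Set.add over cp u []
theorem pvCombAdd_eq (u : List Int) : ∀ s : PySem.Set (Int × Int),
    pvCombAdd s u = PySem.Set.update s (cp u []) := by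
  induction u with
  | nil => intro s; simp [pvCombAdd, cp, PySem.Set.update]
  | cons a u ih =>
    intro s
    rw [pvCombAdd, ← PySem.Set.update_map_eq_foldl_add u (fun y => (a, y)) s, ih, cp,
      List.append_nil, ← PySem.Set.update_append]

-- Source B's dedup loop is Set.ofList
theorem seen_eq (l : List Int) : ∀ s : List Int,
    l.foldl (fun seen x => if x ∉ seen then seen ++ [x] else seen) s = l.foldl PySem.Set.add s := by
  induction l with
  | nil => intro s; rfl
  | cons x l ih =>
    intro s
    rw [List.foldl_cons, List.foldl_cons, ih]
    by_cases hx : x ∈ s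
    · rw [if_neg (by simpa using hx), PySem.Set.add_of_mem hx]
    · rw [if_pos (by simpa using hx), PySem.Set.add_of_not_mem hx]

-- per-cluster agreement
theorem cluster_step (cluster : List Int) (s : PySem.Set (Int × Int)) :
    PySem.Set.update s
      (cluster.foldl (fun combs i =>
        cluster.foldl (fun combs j =>
          if (j, i) ∉ combs ∧ i ≠ j then combs ++ [(i, j)] else combs) combs) [])
      = pvCombAdd s (cluster.foldl (fun seen x => if x ∉ seen then seen ++ [x] else seen) []) := by
  have hbody := outer_loop cluster cluster [] (PySem.Set.ofList cluster) [] (by simp) (by simp) (by simp [cp])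
  rw [seen_eq, ← PySem.Set.ofList_eq_foldl, pvCombAdd_eq,
    PySem.Set.update_eq_append_filter, PySem.Set.update_eq_append_filter, hbody,
    PySem.Set.ofList_eq_self_of_nodup _ (cp_nodup (by simp))]

-- the global fold over clusters
theorem global_fold (clusters : List (List Int)) :
    ∀ (acc : List (Int × Int)) (s : PySem.Set (Int × Int)), PySem.Set.ofList acc = s →
      PySem.Set.ofList
        (clusters.foldl (fun output cluster =>
          let combinations :=
            cluster.foldl (fun combs i =>
              cluster.foldl (fun combs j =>
                if (j, i) ∉ combs ∧ i ≠ j then combs ++ [(i, j)] else combs) combs) []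
          combinations.foldl (fun out couple => out ++ [couple]) output) acc)
        = clusters.foldl (fun output cluster =>
            let seen := cluster.foldl (fun seen x => if x ∉ seen then seen ++ [x] else seen) []
            pvCombAdd output seen) s := by
  induction clusters with
  | nil => intro acc s h; simpa using h
  | cons c rest ih =>
    intro acc s h
    rw [List.foldl_cons, List.foldl_cons]
    refine ih _ _ ?_
    simp only [PySem.List.foldl_append_singleton]
    rw [PySem.Set.ofList_append, h, cluster_step]

-- ===== VERDICT (by name: the statement is the Claim_ definition above) =====
theorem cluster2pairs_spec : Claim_equal_cluster2pairs := by
  intro clusters _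
  unfold Spec_cluster2pairs cluster2pairs cluster2pairs_alt
  exact global_fold clusters [] [] rfl
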